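-- pv_equiv track=rewrite | github.com/Zayitskin/aoc2020 | day 09/main.py | part1
-- ===== SOURCE A (Python) =====
-- def part1(data: list) -> int:
--
--     start: int = 0
--     end: int = 25
--     #Go through each number in the list
--     for i in range(25, len(data)):
--         cleared: bool = False
--         #For each pair of different numbers in the previous 25
--         for x in range(start, end):
--             for y in range(start, end):
--                 if x == y:
--                     continue
--                 #Ensure at least one pair adds to the current number
--                 if data[i] == data[x] + data[y]:
--                     cleared = True
--         #If none does, the current number is the solution
--         if cleared == False:
--             return data[i]
--         #Otherwise, shift forward the 25 numbers to be checked
--         else: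
--             start += 1
--             end += 1
--
--     return -1
-- ===== SOURCE B (Python) =====
-- def part1(data: list) -> int:
--     for i in range(25, len(data)):
--         target = data[i]
--         counts = {}
--         for v in data[i - 25:i]:
--             counts[v] = counts.get(v, 0) + 1
--         for v in counts:
--             if counts.get(target - v, 0) > (1 if target - v == v else 0):
--                 break
--         else:
--             return target
--     return -1
-- ===== Notes on version B (the rewrite author's own statement) =====
-- stated objective: alternative
-- what changed: A scans all ~625 ordered index pairs of each 25-number window with two nested loops; B builds a counting dict of the window once and, for each distinct value v, checks the complement target-v with a single lookup (needing count >= 2 when target-v == v).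
import Mathlib
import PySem

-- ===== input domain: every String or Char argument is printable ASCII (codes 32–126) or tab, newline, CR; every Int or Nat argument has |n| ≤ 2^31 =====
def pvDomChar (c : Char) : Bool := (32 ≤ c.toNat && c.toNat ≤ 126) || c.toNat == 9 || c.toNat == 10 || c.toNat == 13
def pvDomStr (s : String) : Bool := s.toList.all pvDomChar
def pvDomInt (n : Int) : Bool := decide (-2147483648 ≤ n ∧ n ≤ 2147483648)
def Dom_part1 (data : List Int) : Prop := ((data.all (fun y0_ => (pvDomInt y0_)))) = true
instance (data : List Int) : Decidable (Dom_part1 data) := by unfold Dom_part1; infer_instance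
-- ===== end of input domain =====

-- B replaces A's nested index-pair scan of each 25-window by a per-window counting
-- dict queried for the complement of each distinct value (objective: alternative).

-- ===== PORT A =====
-- the triple-nested scan: cleared = any pair x ≠ y in [s,e) with data[i] = data[x]+data[y]
def part1Check (data : List Int) (i s e : Int) : Bool :=
  (PySem.List.pyRange s e 1).foldl (fun cleared x =>
    (PySem.List.pyRange s e 1).foldl (fun cleared y =>
      if x = y then cleared
      else if PySem.List.pyGetD data i 0 = PySem.List.pyGetD data x 0 + PySem.List.pyGetD data y 0
        then true else cleared) cleared) false

-- the outer 'for i in range(25, len(data))' with early return, carrying start/end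
def part1Go (data : List Int) (s e : Int) : List Int → Int
  | [] => -1
  | i :: rest =>
    if part1Check data i s e then part1Go data (s + 1) (e + 1) rest
    else PySem.List.pyGetD data i 0

def part1 (data : List Int) : Int :=
  part1Go data 0 25 (PySem.List.pyRange 25 (data.length : Int) 1)

-- ===== PORT B =====
-- counts = {}; for v in window: counts[v] = counts.get(v, 0) + 1; then scan the keys
def part1AltCheck (data : List Int) (i : Int) : Bool :=
  let target := PySem.List.pyGetD data i 0
  let counts := (PySem.List.slice data (some (i - 25)) (some i)).foldl
      (fun d v => d.modify v 0 (· + 1)) PySem.Dict.empty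
  counts.keys.any (fun v =>
    decide (counts.getD (target - v) 0 > (if target - v = v then (1 : Int) else 0)))

def part1AltGo (data : List Int) : List Int → Int
  | [] => -1
  | i :: rest =>
    if part1AltCheck data i then part1AltGo data rest
    else PySem.List.pyGetD data i 0

def part1_alt (data : List Int) : Int :=
  part1AltGo data (PySem.List.pyRange 25 (data.length : Int) 1)

-- ===== PRECONDITION & SPEC =====
def Spec_part1 (data : List Int) (out : Int) : Prop := out = part1_alt data
instance (data : List Int) (out : Int) : Decidable (Spec_part1 data out) := by unfold Spec_part1; infer_instance

-- ===== CLAIM (what is proved, stated in full; the proofs are below) =====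
def Claim_equal_part1 : Prop := ∀ (data : List Int), Dom_part1 data → Spec_part1 data (part1 data)

-- ===== LEMMAS AND PROOFS =====

lemma foldl_or_bool {α : Type} (q : α → Bool) (l : List α) (b : Bool) :
    l.foldl (fun c y => c || q y) b = (b || l.any q) := by
  induction l generalizing b with
  | nil => simp
  | cons a tl ih => simp [List.foldl_cons, ih, Bool.or_assoc]

-- A's check is an existential over index pairs
lemma check_iff (data : List Int) (i s e : Int) :
    part1Check data i s e = true ↔
      ∃ x y : Int, (s ≤ x ∧ x < e) ∧ (s ≤ y ∧ y < e) ∧ x ≠ y ∧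
        PySem.List.pyGetD data i 0 = PySem.List.pyGetD data x 0 + PySem.List.pyGetD data y 0 := by
  unfold part1Check
  have hinner : ∀ x : Int,
      (fun (cleared : Bool) (y : Int) =>
        if x = y then cleared
        else if PySem.List.pyGetD data i 0 = PySem.List.pyGetD data x 0 + PySem.List.pyGetD data y 0
          then true else cleared)
      = fun (cleared : Bool) (y : Int) => cleared ||
          decide (x ≠ y ∧ PySem.List.pyGetD data i 0 = PySem.List.pyGetD data x 0 + PySem.List.pyGetD data y 0) := by
    intro x; funext c y
    by_cases h1 : x = y <;> by_cases h2 : PySem.List.pyGetD data i 0 = PySem.List.pyGetD data x 0 + PySem.List.pyGetD data y 0 <;>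
      simp [h1, h2]
  have houter :
      (fun (cleared : Bool) (x : Int) =>
        (PySem.List.pyRange s e 1).foldl (fun cleared y =>
          if x = y then cleared
          else if PySem.List.pyGetD data i 0 = PySem.List.pyGetD data x 0 + PySem.List.pyGetD data y 0
            then true else cleared) cleared)
      = fun (cleared : Bool) (x : Int) => cleared ||
          (PySem.List.pyRange s e 1).any (fun y =>
            decide (x ≠ y ∧ PySem.List.pyGetD data i 0 = PySem.List.pyGetD data x 0 + PySem.List.pyGetD data y 0)) := by
    funext c x
    rw [hinner x, foldl_or_bool]
  rw [houter, foldl_or_bool]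
  simp [List.any_eq_true, PySem.List.mem_pyRange_one]

-- B's check is an existential over the window's values
lemma altCheck_iff (data : List Int) (i : Int) :
    part1AltCheck data i = true ↔
      ∃ v ∈ PySem.List.slice data (some (i - 25)) (some i),
        ((PySem.List.slice data (some (i - 25)) (some i)).count
            (PySem.List.pyGetD data i 0 - v) : Int) >
          (if PySem.List.pyGetD data i 0 - v = v then (1 : Int) else 0) := by
  unfold part1AltCheck
  have hc : (PySem.List.slice data (some (i - 25)) (some i)).foldl
      (fun d v => d.modify v 0 (· + 1)) PySem.Dict.empty
      = PySem.Dict.counter (PySem.List.slice data (some (i - 25)) (some i)) := by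
    rw [PySem.Dict.counter_eq_foldl]
  rw [hc]
  simp [List.any_eq_true, PySem.Dict.keys_counter, PySem.Dict.getD_counter,
    PySem.Set.mem_ofList]

-- the pure combinatorial core: a pair at two distinct positions vs. value counts
lemma pair_iff_count (w : List Int) (t : Int) :
    (∃ j k : Nat, j < w.length ∧ k < w.length ∧ j ≠ k ∧ t = w.getD j 0 + w.getD k 0) ↔
      ∃ v ∈ w, (w.count (t - v) : Int) > (if t - v = v then (1 : Int) else 0) := by
  constructor
  · rintro ⟨j, k, hj, hk, hjk, ht⟩
    rw [List.getD_eq_getElem w 0 hj, List.getD_eq_getElem w 0 hk] at ht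
    refine ⟨w[j], List.getElem_mem hj, ?_⟩
    have hk' : t - w[j] = w[k] := by omega
    by_cases hvv : t - w[j] = w[j]
    · rw [if_pos hvv]
      have hdup : w.Duplicate w[j] := by
        rcases Nat.lt_or_ge j k with h | h
        · exact List.duplicate_iff_exists_distinct_get.mpr
            ⟨⟨j, hj⟩, ⟨k, hk⟩, h, by simp, by simp [← hk', hvv]⟩
        · have hkj : k < j := by omega
          exact List.duplicate_iff_exists_distinct_get.mpr
            ⟨⟨k, hk⟩, ⟨j, hj⟩, hkj, by simp [← hk', hvv], by simp⟩
      have h2 := List.duplicate_iff_two_le_count.mp hdup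
      rw [hvv]
      have : (2 : Int) ≤ (w.count w[j] : Int) := by exact_mod_cast h2
      omega
    · rw [if_neg hvv]
      have hmem : t - w[j] ∈ w := by rw [hk']; exact List.getElem_mem hk
      have := List.count_pos_iff.mpr hmem
      have : (1 : Int) ≤ (w.count (t - w[j]) : Int) := by exact_mod_cast this
      omega
  · rintro ⟨v, hv, hcnt⟩
    by_cases hvv : t - v = v
    · rw [if_pos hvv, hvv] at hcnt
      have h2 : 2 ≤ w.count v := by omega
      obtain ⟨n, m, hnm, h1, h2'⟩ :=
        List.duplicate_iff_exists_distinct_get.mp (List.duplicate_iff_two_le_count.mpr h2)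
      refine ⟨n, m, n.isLt, m.isLt, ?_, ?_⟩
      · exact fun h => absurd (Fin.ext h) (ne_of_lt hnm)
      · rw [List.getD_eq_getElem w 0 n.isLt, List.getD_eq_getElem w 0 m.isLt]
        simp only [List.get_eq_getElem] at h1 h2'
        rw [← h1, ← h2']; omega
    · rw [if_neg hvv] at hcnt
      have hmem : t - v ∈ w := List.count_pos_iff.mp (by omega)
      obtain ⟨j, hj, hje⟩ := List.getElem_of_mem hv
      obtain ⟨k, hk, hke⟩ := List.getElem_of_mem hmem
      refine ⟨j, k, hj, hk, ?_, ?_⟩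
      · intro h; subst h; apply hvv; rw [← hke]; exact hje
      · rw [List.getD_eq_getElem w 0 hj, List.getD_eq_getElem w 0 hk, hje, hke]; omega

-- window bridging: with 0 ≤ s, e = s + 25 (say), e ≤ len, indices ↔ slice positions
-- per-step equality of the two checks
lemma checks_eq (data : List Int) (i : Int) (h25 : 25 ≤ i) (hlen : i ≤ (data.length : Int)) :
    part1Check data i (i - 25) i = part1AltCheck data i := by
  set w := PySem.List.slice data (some (i - 25)) (some i) with hw
  have h0 : (0 : Int) ≤ i - 25 := by omega
  have hwdt : w = (data.drop (i - 25).toNat).take (i.toNat - (i - 25).toNat) :=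
    PySem.List.slice_toNat data h0 (by omega)
  have hts : i.toNat - (i - 25).toNat = 25 := by omega
  have hlen : w.length = 25 := by
    rw [hwdt]; simp [List.length_take, List.length_drop]; omega
  have hbridge : ∀ j : Nat, j < 25 →
      w.getD j 0 = PySem.List.pyGetD data ((i - 25) + (j : Int)) 0 := by
    intro j hjlt
    have hxlt : (i - 25) + (j : Int) < (data.length : Int) := by omega
    rw [PySem.List.pyGetD_eq_getElem data 0 (by omega) hxlt]
    have hj' : j < w.length := by omega
    rw [List.getD_eq_getElem w 0 hj']
    have hidx : ((i - 25) + (j : Int)).toNat = (i - 25).toNat + j := by omega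
    simp only [hwdt, List.getElem_take, List.getElem_drop, hidx]
  apply Bool.coe_iff_coe.mp
  rw [check_iff, altCheck_iff, ← hw]
  constructor
  · rintro ⟨x, y, ⟨hx1, hx2⟩, ⟨hy1, hy2⟩, hne, heq⟩
    have hxj : x = (i - 25) + ((x - (i - 25)).toNat : Int) := by omega
    have hyj : y = (i - 25) + ((y - (i - 25)).toNat : Int) := by omega
    have hmain := (pair_iff_count w (PySem.List.pyGetD data i 0)).mp
      ⟨(x - (i - 25)).toNat, (y - (i - 25)).toNat, by omega, by omega, by omega, ?_⟩
    · exact hmain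
    · rw [hbridge _ (by omega), hbridge _ (by omega), ← hxj, ← hyj]
      exact heq
  · intro h
    obtain ⟨j, k, hj, hk, hjk, ht⟩ := (pair_iff_count w (PySem.List.pyGetD data i 0)).mpr h
    refine ⟨(i - 25) + (j : Int), (i - 25) + (k : Int),
            ⟨by omega, by omega⟩, ⟨by omega, by omega⟩, by omega, ?_⟩
    rw [← hbridge j (by omega), ← hbridge k (by omega)]
    exact ht

lemma go_eq (data : List Int) :
    ∀ (m : Nat) (a : Int), 25 ≤ a → ((data.length : Int) - a).toNat = m →
      part1Go data (a - 25) a (PySem.List.pyRange a (data.length : Int) 1)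
        = part1AltGo data (PySem.List.pyRange a (data.length : Int) 1) := by
  intro m
  induction m with
  | zero =>
    intro a ha hm
    have hba : (data.length : Int) ≤ a := by omega
    rw [PySem.List.pyRange_one_eq_nil hba]
    simp [part1Go, part1AltGo]
  | succ n ih =>
    intro a ha hm
    have hab : a < (data.length : Int) := by omega
    rw [PySem.List.pyRange_one_cons hab]
    have hcheck := checks_eq data a ha (le_of_lt hab)
    simp only [part1Go, part1AltGo, hcheck]
    by_cases h : part1AltCheck data a = true
    · have : a - 25 + 1 = (a + 1) - 25 := by ring
      rw [if_pos h, if_pos h, this]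
      exact ih (a + 1) (by omega) (by omega)
    · rw [if_neg h, if_neg h]

-- ===== VERDICT (by name: the statement is the Claim_ definition above) =====
theorem part1_spec : Claim_equal_part1 := by
  intro data _
  unfold Spec_part1 part1 part1_alt
  have h := go_eq data ((data.length : Int) - 25).toNat 25 (by omega) rfl
  simpa using h
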